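-- pv_equiv track=rewrite | github.com/ajgeglio/arcpy-dem-processing | backup/src_old.py | classify_landform_from_bathymorphon
-- ===== SOURCE A (Python) =====
-- def classify_landform_from_bathymorphon(number, classes="10c"):
--     """
--     Function to calculate potential local ternary patterns for a given integer number.
--     Then pass the ternary pattern to the lookup table to classify the landform.
--     The lookup table is based on the number of minuses and pluses in the ternary pattern.
--
--     Parameters:
--     number (int): The input integer number.
--
--     Returns:
--     list: A list of potential local ternary patterns with a length of 8.
--     """
--     combined_lookup_table = {
--         "10c": {
--             (0, 0): "FL", (0, 1): "FL", (0, 2): "FL", (0, 3): "FS", (0, 4): "FS", (0, 5): "VL", (0, 6): "VL", (0, 7): "VL", (0, 8): "PT",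
--             (1, 0): "FL", (1, 1): "FL", (1, 2): "FS", (1, 3): "FS", (1, 4): "FS", (1, 5): "VL", (1, 6): "VL", (1, 7): "VL",
--             (2, 0): "FL", (2, 1): "SH", (2, 2): "SL", (2, 3): "SL", (2, 4): "CN", (2, 5): "CN", (2, 6): "VL",
--             (3, 0): "SH", (3, 1): "SH", (3, 2): "SL", (3, 3): "SL", (3, 4): "SL", (3, 5): "CN",
--             (4, 0): "SH", (4, 1): "SH", (4, 2): "CV", (4, 3): "SL", (4, 4): "SL",
--             (5, 0): "RI", (5, 1): "RI", (5, 2): "CV", (5, 3): "CV",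
--             (6, 0): "RI", (6, 1): "RI", (6, 2): "RI",
--             (7, 0): "RI", (7, 1): "RI",
--             (8, 0): "PK"
--         },
--         "6c": {
--             (0, 0): "FL", (0, 1): "FL", (0, 2): "FL", (0, 3): "FS", (0, 4): "FS", (0, 5): "VL", (0, 6): "VL", (0, 7): "VL", (0, 8): "VL",
--             (1, 0): "FL", (1, 1): "FL", (1, 2): "FS", (1, 3): "FS", (1, 4): "FS", (1, 5): "VL", (1, 6): "VL", (1, 7): "VL",
--             (2, 0): "FL", (2, 1): "SH", (2, 2): "SL", (2, 3): "SL", (2, 4): "SL", (2, 5): "VL", (2, 6): "VL",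
--             (3, 0): "SH", (3, 1): "SH", (3, 2): "SL", (3, 3): "SL", (3, 4): "SL", (3, 5): "SL",
--             (4, 0): "SH", (4, 1): "SH", (4, 2): "SL", (4, 3): "SL", (4, 4): "SL",
--             (5, 0): "RI", (5, 1): "RI", (5, 2): "RI", (5, 3): "SL",
--             (6, 0): "RI", (6, 1): "RI", (6, 2): "RI",
--             (7, 0): "RI", (7, 1): "RI",
--             (8, 0): "RI"
--         },
--         "5c": {
--             (0, 0): "FL", (0, 1): "FL", (0, 2): "FL", (0, 3): "SL", (0, 4): "VL", (0, 5): "VL", (0, 6): "VL", (0, 7): "VL", (0, 8): "VL",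
--             (1, 0): "FL", (1, 1): "FL", (1, 2): "SL", (1, 3): "SL", (1, 4): "VL", (1, 5): "VL", (1, 6): "VL", (1, 7): "VL",
--             (2, 0): "FL", (2, 1): "SL", (2, 2): "SL", (2, 3): "SL", (2, 4): "SL", (2, 5): "VL", (2, 6): "VL",
--             (3, 0): "SL", (3, 1): "SL", (3, 2): "SL", (3, 3): "SL", (3, 4): "SL", (3, 5): "SL",
--             (4, 0): "RI", (4, 1): "RI", (4, 2): "SL", (4, 3): "SL", (4, 4): "SL",
--             (5, 0): "RI", (5, 1): "RI", (5, 2): "RI", (5, 3): "SL",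
--             (6, 0): "RI", (6, 1): "RI", (6, 2): "RI",
--             (7, 0): "RI", (7, 1): "RI",
--             (8, 0): "PK"
--         },
--         "4c": {
--             (0, 0): "FL", (0, 1): "FL", (0, 2): "FL", (0, 3): "SL", (0, 4): "VL", (0, 5): "VL", (0, 6): "VL", (0, 7): "VL", (0, 8): "VL",
--             (1, 0): "FL", (1, 1): "FL", (1, 2): "SL", (1, 3): "SL", (1, 4): "VL", (1, 5): "VL", (1, 6): "VL", (1, 7): "VL",
--             (2, 0): "FL", (2, 1): "SL", (2, 2): "SL", (2, 3): "SL", (2, 4): "SL", (2, 5): "VL", (2, 6): "VL",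
--             (3, 0): "SL", (3, 1): "SL", (3, 2): "SL", (3, 3): "SL", (3, 4): "SL", (3, 5): "SL",
--             (4, 0): "RI", (4, 1): "RI", (4, 2): "SL", (4, 3): "SL", (4, 4): "SL",
--             (5, 0): "RI", (5, 1): "RI", (5, 2): "RI", (5, 3): "SL",
--             (6, 0): "RI", (6, 1): "RI", (6, 2): "RI",
--             (7, 0): "RI", (7, 1): "RI",
--             (8, 0): "RI"
--         }
--     }
--     landform_abrv_to_int_dict = {
--         "FL": 1, "PK": 2, "RI": 3, "SH": 4, "CV": 5, "SL": 6, "CN": 7, "FS": 8, "VL": 9, "PT": 10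
--     }
--     if number < 0:
--         raise ValueError("The input number must be a non-negative integer.")
--
--     ternary_patterns = []
--     while number > 0:
--         ternary_patterns.append(number % 3)
--         number //= 3
--
--     # Reverse the list to get the ternary pattern in the correct order
--     ternary_patterns.reverse()
--
--     # Ensure the result has exactly 8 numbers by padding with zeros at the beginning
--     while len(ternary_patterns) < 8:
--         ternary_patterns.insert(0, 0)
--     # count the minuses and plusses based on the local ternary patterns
--     minuses, pluses = ternary_patterns.count(0), ternary_patterns.count(2)
--     lookup_tuple = (minuses, pluses)
--
--     land_abrv = combined_lookup_table[classes].get(lookup_tuple, "Unknown")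
--     land_int = landform_abrv_to_int_dict.get(land_abrv, "Unknown")
--     return land_int
-- ===== SOURCE B (Python) =====
-- # Fixed-depth recursion over the 8 low ternary digits (no digit list, no reverse,
-- # no padding loop, no count() passes) and a single flat 81-entry integer code
-- # table per class indexed by minuses*9+pluses: both string dicts of A disappear.
-- # Cells with minuses+pluses > 8 are unreachable (8 digits are counted) and hold 0.
-- _CODE_TABLES = {
--     "10c": [1, 1, 1, 8, 8, 9, 9, 9, 10, 1, 1, 8, 8, 8, 9, 9, 9, 0, 1, 4, 6, 6, 7, 7, 9, 0, 0, 4, 4, 6, 6, 6, 7, 0, 0, 0, 4, 4, 5, 6, 6, 0, 0, 0, 0, 3, 3, 5, 5, 0, 0, 0, 0, 0, 3, 3, 3, 0, 0, 0, 0, 0, 0, 3, 3, 0, 0, 0, 0, 0, 0, 0, 2, 0, 0, 0, 0, 0, 0, 0, 0],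
--     "6c": [1, 1, 1, 8, 8, 9, 9, 9, 9, 1, 1, 8, 8, 8, 9, 9, 9, 0, 1, 4, 6, 6, 6, 9, 9, 0, 0, 4, 4, 6, 6, 6, 6, 0, 0, 0, 4, 4, 6, 6, 6, 0, 0, 0, 0, 3, 3, 3, 6, 0, 0, 0, 0, 0, 3, 3, 3, 0, 0, 0, 0, 0, 0, 3, 3, 0, 0, 0, 0, 0, 0, 0, 3, 0, 0, 0, 0, 0, 0, 0, 0],
--     "5c": [1, 1, 1, 6, 9, 9, 9, 9, 9, 1, 1, 6, 6, 9, 9, 9, 9, 0, 1, 6, 6, 6, 6, 9, 9, 0, 0, 6, 6, 6, 6, 6, 6, 0, 0, 0, 3, 3, 6, 6, 6, 0, 0, 0, 0, 3, 3, 3, 6, 0, 0, 0, 0, 0, 3, 3, 3, 0, 0, 0, 0, 0, 0, 3, 3, 0, 0, 0, 0, 0, 0, 0, 2, 0, 0, 0, 0, 0, 0, 0, 0],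
--     "4c": [1, 1, 1, 6, 9, 9, 9, 9, 9, 1, 1, 6, 6, 9, 9, 9, 9, 0, 1, 6, 6, 6, 6, 9, 9, 0, 0, 6, 6, 6, 6, 6, 6, 0, 0, 0, 3, 3, 6, 6, 6, 0, 0, 0, 0, 3, 3, 3, 6, 0, 0, 0, 0, 0, 3, 3, 3, 0, 0, 0, 0, 0, 0, 3, 3, 0, 0, 0, 0, 0, 0, 0, 3, 0, 0, 0, 0, 0, 0, 0, 0],
-- }
--
--
-- def _counts(n, k):
--     """(zeros, twos) among the k low ternary digits of n (leading zeros included)."""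
--     if k == 0:
--         return 0, 0
--     z, t = _counts(n // 3, k - 1)
--     d = n % 3
--     return z + (d == 0), t + (d == 2)
--
--
-- def classify_landform_from_bathymorphon(number, classes="10c"):
--     if number < 0:
--         raise ValueError("The input number must be a non-negative integer.")
--     minuses, pluses = _counts(number, 8)
--     return _CODE_TABLES[classes][minuses * 9 + pluses]
-- ===== Notes on version B (the rewrite author's own statement) =====
-- stated objective: simpler
-- what changed: Replaces A's build-digit-list/reverse/pad/two-count() pipeline and its two string dicts with a fixed-depth (8) recursion over the low ternary digits (leading zeros counted for free, so no padding logic exists) and one flat 81-entry integer code table per class indexed by minuses*9+pluses, eliminating the (minuses,pluses) dict and the abbreviation-to-int dict entirely.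
-- outside the precondition, e.g. on classify_landform_from_bathymorphon(13122, '10c'): A returns 'Unknown', B returns 2; on classify_landform_from_bathymorphon(6561, '10c'): A returns 2, B returns 2
import Mathlib
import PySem

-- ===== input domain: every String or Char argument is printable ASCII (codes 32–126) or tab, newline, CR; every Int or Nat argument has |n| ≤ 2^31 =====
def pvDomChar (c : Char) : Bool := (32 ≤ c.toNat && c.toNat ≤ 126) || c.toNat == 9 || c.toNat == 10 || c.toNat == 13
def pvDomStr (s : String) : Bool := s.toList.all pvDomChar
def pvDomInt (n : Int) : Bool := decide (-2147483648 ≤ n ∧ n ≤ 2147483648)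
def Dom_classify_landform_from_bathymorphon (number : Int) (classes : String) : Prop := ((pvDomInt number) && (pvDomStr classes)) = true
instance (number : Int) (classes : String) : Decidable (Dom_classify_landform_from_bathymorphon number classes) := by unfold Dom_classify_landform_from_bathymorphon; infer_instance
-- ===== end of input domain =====

-- B replaces A's digit-list/reverse/pad/count pipeline and its two string dicts by a
-- fixed-depth recursion over the 8 low ternary digits and one flat integer code table.

-- ===== PORT A =====
-- A's nested lookup table: classes -> dict keyed by (minuses, pluses)
def aCombinedLookupTable : PySem.Dict String (PySem.Dict (Int × Int) String) :=
  PySem.Dict.ofList [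
    ("10c", PySem.Dict.ofList [
      ((0, 0), "FL"), ((0, 1), "FL"), ((0, 2), "FL"), ((0, 3), "FS"), ((0, 4), "FS"), ((0, 5), "VL"), ((0, 6), "VL"), ((0, 7), "VL"), ((0, 8), "PT"),
      ((1, 0), "FL"), ((1, 1), "FL"), ((1, 2), "FS"), ((1, 3), "FS"), ((1, 4), "FS"), ((1, 5), "VL"), ((1, 6), "VL"), ((1, 7), "VL"),
      ((2, 0), "FL"), ((2, 1), "SH"), ((2, 2), "SL"), ((2, 3), "SL"), ((2, 4), "CN"), ((2, 5), "CN"), ((2, 6), "VL"),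
      ((3, 0), "SH"), ((3, 1), "SH"), ((3, 2), "SL"), ((3, 3), "SL"), ((3, 4), "SL"), ((3, 5), "CN"),
      ((4, 0), "SH"), ((4, 1), "SH"), ((4, 2), "CV"), ((4, 3), "SL"), ((4, 4), "SL"),
      ((5, 0), "RI"), ((5, 1), "RI"), ((5, 2), "CV"), ((5, 3), "CV"),
      ((6, 0), "RI"), ((6, 1), "RI"), ((6, 2), "RI"),
      ((7, 0), "RI"), ((7, 1), "RI"),
      ((8, 0), "PK")]),
    ("6c", PySem.Dict.ofList [
      ((0, 0), "FL"), ((0, 1), "FL"), ((0, 2), "FL"), ((0, 3), "FS"), ((0, 4), "FS"), ((0, 5), "VL"), ((0, 6), "VL"), ((0, 7), "VL"), ((0, 8), "VL"),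
      ((1, 0), "FL"), ((1, 1), "FL"), ((1, 2), "FS"), ((1, 3), "FS"), ((1, 4), "FS"), ((1, 5), "VL"), ((1, 6), "VL"), ((1, 7), "VL"),
      ((2, 0), "FL"), ((2, 1), "SH"), ((2, 2), "SL"), ((2, 3), "SL"), ((2, 4), "SL"), ((2, 5), "VL"), ((2, 6), "VL"),
      ((3, 0), "SH"), ((3, 1), "SH"), ((3, 2), "SL"), ((3, 3), "SL"), ((3, 4), "SL"), ((3, 5), "SL"),
      ((4, 0), "SH"), ((4, 1), "SH"), ((4, 2), "SL"), ((4, 3), "SL"), ((4, 4), "SL"),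
      ((5, 0), "RI"), ((5, 1), "RI"), ((5, 2), "RI"), ((5, 3), "SL"),
      ((6, 0), "RI"), ((6, 1), "RI"), ((6, 2), "RI"),
      ((7, 0), "RI"), ((7, 1), "RI"),
      ((8, 0), "RI")]),
    ("5c", PySem.Dict.ofList [
      ((0, 0), "FL"), ((0, 1), "FL"), ((0, 2), "FL"), ((0, 3), "SL"), ((0, 4), "VL"), ((0, 5), "VL"), ((0, 6), "VL"), ((0, 7), "VL"), ((0, 8), "VL"),
      ((1, 0), "FL"), ((1, 1), "FL"), ((1, 2), "SL"), ((1, 3), "SL"), ((1, 4), "VL"), ((1, 5), "VL"), ((1, 6), "VL"), ((1, 7), "VL"),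
      ((2, 0), "FL"), ((2, 1), "SL"), ((2, 2), "SL"), ((2, 3), "SL"), ((2, 4), "SL"), ((2, 5), "VL"), ((2, 6), "VL"),
      ((3, 0), "SL"), ((3, 1), "SL"), ((3, 2), "SL"), ((3, 3), "SL"), ((3, 4), "SL"), ((3, 5), "SL"),
      ((4, 0), "RI"), ((4, 1), "RI"), ((4, 2), "SL"), ((4, 3), "SL"), ((4, 4), "SL"),
      ((5, 0), "RI"), ((5, 1), "RI"), ((5, 2), "RI"), ((5, 3), "SL"),
      ((6, 0), "RI"), ((6, 1), "RI"), ((6, 2), "RI"),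
      ((7, 0), "RI"), ((7, 1), "RI"),
      ((8, 0), "PK")]),
    ("4c", PySem.Dict.ofList [
      ((0, 0), "FL"), ((0, 1), "FL"), ((0, 2), "FL"), ((0, 3), "SL"), ((0, 4), "VL"), ((0, 5), "VL"), ((0, 6), "VL"), ((0, 7), "VL"), ((0, 8), "VL"),
      ((1, 0), "FL"), ((1, 1), "FL"), ((1, 2), "SL"), ((1, 3), "SL"), ((1, 4), "VL"), ((1, 5), "VL"), ((1, 6), "VL"), ((1, 7), "VL"),
      ((2, 0), "FL"), ((2, 1), "SL"), ((2, 2), "SL"), ((2, 3), "SL"), ((2, 4), "SL"), ((2, 5), "VL"), ((2, 6), "VL"),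
      ((3, 0), "SL"), ((3, 1), "SL"), ((3, 2), "SL"), ((3, 3), "SL"), ((3, 4), "SL"), ((3, 5), "SL"),
      ((4, 0), "RI"), ((4, 1), "RI"), ((4, 2), "SL"), ((4, 3), "SL"), ((4, 4), "SL"),
      ((5, 0), "RI"), ((5, 1), "RI"), ((5, 2), "RI"), ((5, 3), "SL"),
      ((6, 0), "RI"), ((6, 1), "RI"), ((6, 2), "RI"),
      ((7, 0), "RI"), ((7, 1), "RI"),
      ((8, 0), "RI")])]

def aLandformAbrvToInt : PySem.Dict String Int :=
  PySem.Dict.ofList [("FL", 1), ("PK", 2), ("RI", 3), ("SH", 4), ("CV", 5), ("SL", 6), ("CN", 7), ("FS", 8), ("VL", 9), ("PT", 10)]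

-- 'while number > 0: append(number % 3); number //= 3' — fuel makes the loop structural;
-- fuel = number.toNat + 1 is more than the iteration count, so behaviour is exact.
def aDigitsLoop (fuel : Nat) (number : Int) (acc : List Int) : List Int :=
  match fuel with
  | 0 => acc
  | fuel + 1 =>
    if number > 0 then
      aDigitsLoop fuel (PySem.Int.floordiv number 3) (acc ++ [PySem.Int.mod number 3])
    else acc

-- 'while len(ternary_patterns) < 8: insert(0, 0)' — at most 8 iterations, fuel 8 is exact.
def aPadLoop (fuel : Nat) (l : List Int) : List Int :=
  match fuel with
  | 0 => l
  | fuel + 1 => if l.length < 8 then aPadLoop fuel (0 :: l) else l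

def classify_landform_from_bathymorphon (number : Int) (classes : String) : Int :=
  if number < 0 then 0  -- Python raises ValueError here; excluded by Pre_
  else
    let ternary_patterns := aDigitsLoop (number.toNat + 1) number []
    let ternary_patterns := ternary_patterns.reverse
    let ternary_patterns := aPadLoop 8 ternary_patterns
    let minuses : Int := PySem.List.count ternary_patterns 0
    let pluses : Int := PySem.List.count ternary_patterns 2
    match aCombinedLookupTable.get? classes with
    | none => 0  -- Python raises KeyError here; excluded by Pre_
    | some table =>
      let land_abrv := table.getD (minuses, pluses) "Unknown"
      match aLandformAbrvToInt.get? land_abrv with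
      | some land_int => land_int
      | none => 0  -- Python returns the string "Unknown" here (not an int); excluded by Pre_

-- ===== PORT B =====
-- B's flat 81-entry integer code tables, indexed by minuses * 9 + pluses;
-- cells with minuses + pluses > 8 are unreachable and hold 0.
def bCodeTables : PySem.Dict String (List Int) :=
  PySem.Dict.ofList [
    ("10c", [1, 1, 1, 8, 8, 9, 9, 9, 10, 1, 1, 8, 8, 8, 9, 9, 9, 0, 1, 4, 6, 6, 7, 7, 9, 0, 0, 4, 4, 6, 6, 6, 7, 0, 0, 0, 4, 4, 5, 6, 6, 0, 0, 0, 0, 3, 3, 5, 5, 0, 0, 0, 0, 0, 3, 3, 3, 0, 0, 0, 0, 0, 0, 3, 3, 0, 0, 0, 0, 0, 0, 0, 2, 0, 0, 0, 0, 0, 0, 0, 0]),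
    ("6c", [1, 1, 1, 8, 8, 9, 9, 9, 9, 1, 1, 8, 8, 8, 9, 9, 9, 0, 1, 4, 6, 6, 6, 9, 9, 0, 0, 4, 4, 6, 6, 6, 6, 0, 0, 0, 4, 4, 6, 6, 6, 0, 0, 0, 0, 3, 3, 3, 6, 0, 0, 0, 0, 0, 3, 3, 3, 0, 0, 0, 0, 0, 0, 3, 3, 0, 0, 0, 0, 0, 0, 0, 3, 0, 0, 0, 0, 0, 0, 0, 0]),
    ("5c", [1, 1, 1, 6, 9, 9, 9, 9, 9, 1, 1, 6, 6, 9, 9, 9, 9, 0, 1, 6, 6, 6, 6, 9, 9, 0, 0, 6, 6, 6, 6, 6, 6, 0, 0, 0, 3, 3, 6, 6, 6, 0, 0, 0, 0, 3, 3, 3, 6, 0, 0, 0, 0, 0, 3, 3, 3, 0, 0, 0, 0, 0, 0, 3, 3, 0, 0, 0, 0, 0, 0, 0, 2, 0, 0, 0, 0, 0, 0, 0, 0]),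
    ("4c", [1, 1, 1, 6, 9, 9, 9, 9, 9, 1, 1, 6, 6, 9, 9, 9, 9, 0, 1, 6, 6, 6, 6, 9, 9, 0, 0, 6, 6, 6, 6, 6, 6, 0, 0, 0, 3, 3, 6, 6, 6, 0, 0, 0, 0, 3, 3, 3, 6, 0, 0, 0, 0, 0, 3, 3, 3, 0, 0, 0, 0, 0, 0, 3, 3, 0, 0, 0, 0, 0, 0, 0, 3, 0, 0, 0, 0, 0, 0, 0, 0])]

-- '_counts(n, k)': (zeros, twos) among the k low ternary digits of n, fixed depth k.
def bCounts (n : Int) (k : Nat) : Int × Int :=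
  match k with
  | 0 => (0, 0)
  | k + 1 =>
    let zt := bCounts (PySem.Int.floordiv n 3) k
    let d := PySem.Int.mod n 3
    (zt.1 + (if d = 0 then 1 else 0), zt.2 + (if d = 2 then 1 else 0))

def classify_landform_from_bathymorphon_alt (number : Int) (classes : String) : Int :=
  if number < 0 then 0  -- Python raises ValueError here; excluded by Pre_
  else
    let mp := bCounts number 8
    match bCodeTables.get? classes with
    | none => 0  -- Python raises KeyError here; excluded by Pre_
    | some table =>
      -- table[minuses * 9 + pluses]; 0 ≤ mp.1, mp.2 ≤ 8 so the index is always in range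
      (PySem.List.pyGet? table (mp.1 * 9 + mp.2)).getD 0

-- ===== PRECONDITION & SPEC =====
-- Pre_ restricts to the function's natural domain: an 8-neighbour ternary pattern code
-- 0 ≤ number < 3^8 with one of the four table keys. A raises ValueError on negative
-- numbers and KeyError on other class strings, and for number ≥ 3^8 (outside the 8-cell
-- pattern domain) the lookup can miss, making A return the string "Unknown" instead of an int.
def Pre_classify_landform_from_bathymorphon (number : Int) (classes : String) : Prop :=
  0 ≤ number ∧ number < 6561 ∧ (classes = "10c" ∨ classes = "6c" ∨ classes = "5c" ∨ classes = "4c")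
instance (number : Int) (classes : String) : Decidable (Pre_classify_landform_from_bathymorphon number classes) := by unfold Pre_classify_landform_from_bathymorphon; infer_instance

def pvWitness_classify_landform_from_bathymorphon : Int × String := (1234, "10c")

def Spec_classify_landform_from_bathymorphon (number : Int) (classes : String) (out : Int) : Prop := out = classify_landform_from_bathymorphon_alt number classes
instance (number : Int) (classes : String) (out : Int) : Decidable (Spec_classify_landform_from_bathymorphon number classes out) := by unfold Spec_classify_landform_from_bathymorphon; infer_instance

-- ===== CLAIM (what is proved, stated in full; the proofs are below) =====
def Claim_equal_classify_landform_from_bathymorphon : Prop := ∀ (number : Int) (classes : String), Dom_classify_landform_from_bathymorphon number classes → Pre_classify_landform_from_bathymorphon number classes → Spec_classify_landform_from_bathymorphon number classes (classify_landform_from_bathymorphon number classes)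

-- ===== LEMMAS AND PROOFS =====
-- A's lookup tail, as a function of (minuses, pluses)
def pvLookA (c : String) (minuses pluses : Int) : Int :=
  match aCombinedLookupTable.get? c with
  | none => 0
  | some table =>
    match aLandformAbrvToInt.get? (table.getD (minuses, pluses) "Unknown") with
    | some land_int => land_int
    | none => 0

-- B's lookup tail, as a function of (minuses, pluses)
def pvLookB (c : String) (minuses pluses : Int) : Int :=
  match bCodeTables.get? c with
  | none => 0
  | some table => (PySem.List.pyGet? table (minuses * 9 + pluses)).getD 0

lemma aDigitsLoop_acc (fuel : Nat) : ∀ (n : Int) (acc : List Int),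
    aDigitsLoop fuel n acc = acc ++ aDigitsLoop fuel n [] := by
  induction fuel with
  | zero => intro n acc; simp [aDigitsLoop]
  | succ fuel ih =>
    intro n acc
    by_cases h : n > 0
    · simp only [aDigitsLoop, if_pos h]
      rw [ih (PySem.Int.floordiv n 3) (acc ++ [PySem.Int.mod n 3]),
          ih (PySem.Int.floordiv n 3) ([] ++ [PySem.Int.mod n 3])]
      simp
    · simp [aDigitsLoop, if_neg h]

-- B's fixed-depth digit recursion, expressed through A's digit list
lemma bCounts_eq (k : Nat) : ∀ (n : Int), 0 ≤ n → n < 3 ^ k → ∀ fuel : Nat, n.toNat < fuel →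
    bCounts n k =
      ((k : Int) - (aDigitsLoop fuel n []).length + ((aDigitsLoop fuel n []).count 0 : Int),
       ((aDigitsLoop fuel n []).count 2 : Int)) := by
  induction k with
  | zero =>
    intro n h0 hk fuel _
    have : n = 0 := by simp at hk; omega
    subst this
    cases fuel <;> simp [bCounts, aDigitsLoop]
  | succ k ih =>
    intro n h0 hk fuel hfuel
    match fuel with
    | 0 => omega
    | fuel + 1 =>
      by_cases h : n > 0
      · have hdiv : PySem.Int.floordiv n 3 = n / 3 := PySem.Int.floordiv_eq_ediv_of_pos (by omega)
        have hmod : PySem.Int.mod n 3 = n % 3 := PySem.Int.mod_eq_emod_of_pos (by omega)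
        have h0' : 0 ≤ n / 3 := by positivity
        have hk' : n / 3 < 3 ^ k := by
          rw [Int.ediv_lt_iff_lt_mul (by omega)]
          have : (3 : Int) ^ (k + 1) = 3 ^ k * 3 := by ring
          omega
        have hf' : (n / 3).toNat < fuel := by
          have : n / 3 < n := by omega
          omega
        simp only [aDigitsLoop, if_pos h]
        rw [aDigitsLoop_acc fuel (PySem.Int.floordiv n 3) ([] ++ [PySem.Int.mod n 3])]
        simp only [bCounts, hdiv, hmod]
        rw [ih (n / 3) h0' hk' fuel hf']
        rcases (show n % 3 = 0 ∨ n % 3 = 1 ∨ n % 3 = 2 by omega) with h' | h' | h' <;>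
          simp [h', Prod.ext_iff] <;> omega
      · have hn : n = 0 := by omega
        subst hn
        have hdiv : PySem.Int.floordiv 0 3 = 0 := by
          rw [PySem.Int.floordiv_eq_ediv_of_pos (by omega)]; simp
        have hmod : PySem.Int.mod 0 3 = 0 := by
          rw [PySem.Int.mod_eq_emod_of_pos (by omega)]; simp
        simp only [aDigitsLoop, bCounts, hdiv, hmod]
        rw [ih 0 le_rfl (by positivity) 1 (by simp)]
        cases fuel <;> simp [aDigitsLoop]

lemma digits_len_le (fuel : Nat) : ∀ (k : Nat) (n : Int), 0 ≤ n → n < 3 ^ k →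
    (aDigitsLoop fuel n []).length ≤ k := by
  induction fuel with
  | zero => intro k n _ _; simp [aDigitsLoop]
  | succ fuel ih =>
    intro k n h0 hk
    by_cases h : n > 0
    · simp only [aDigitsLoop, if_pos h]
      rw [aDigitsLoop_acc fuel (PySem.Int.floordiv n 3) ([] ++ [PySem.Int.mod n 3])]
      match k with
      | 0 => simp at hk; omega
      | k + 1 =>
        have hdiv : PySem.Int.floordiv n 3 = n / 3 := PySem.Int.floordiv_eq_ediv_of_pos (by omega)
        have hlt : n / 3 < 3 ^ k := by
          rw [Int.ediv_lt_iff_lt_mul (by omega)]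
          have : (3 : Int) ^ (k + 1) = 3 ^ k * 3 := by ring
          omega
        have := ih k (PySem.Int.floordiv n 3) (by rw [hdiv]; positivity) (by rw [hdiv]; exact hlt)
        simpa using this
    · simp [aDigitsLoop, if_neg h]

lemma padLoop_eq (fuel : Nat) : ∀ (l : List Int), 8 ≤ l.length + fuel →
    aPadLoop fuel l = List.replicate (8 - l.length) 0 ++ l := by
  induction fuel with
  | zero =>
    intro l h
    have : 8 - l.length = 0 := by omega
    simp [aPadLoop, this]
  | succ fuel ih =>
    intro l h
    by_cases hl : l.length < 8
    · simp only [aPadLoop, if_pos hl]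
      rw [ih (0 :: l) (by simp; omega)]
      have : 8 - l.length = (8 - (0 :: l).length) + 1 := by simp; omega
      rw [this, List.replicate_succ']
      simp
    · simp only [aPadLoop, if_neg hl]
      have : 8 - l.length = 0 := by omega
      simp [this]

lemma count02_le (l : List Int) : l.count 0 + l.count 2 ≤ l.length := by
  induction l with
  | nil => simp
  | cons x xs ih =>
    simp only [List.count_cons, List.length_cons]
    by_cases h0 : x = 0 <;> by_cases h2 : x = 2 <;> simp [h0, h2] at * <;> omega

set_option maxHeartbeats 1000000 in
set_option maxRecDepth 100000 in
lemma lookup_eq : ∀ c ∈ (["10c", "6c", "5c", "4c"] : List String), ∀ m ∈ List.range 9, ∀ p ∈ List.range 9,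
    pvLookA c (m : Int) (p : Int) = pvLookB c (m : Int) (p : Int) := by
  decide

lemma A_char (n : Int) (c : String) (h0 : 0 ≤ n) :
    classify_landform_from_bathymorphon n c =
      pvLookA c ((PySem.List.count (aPadLoop 8 (aDigitsLoop (n.toNat + 1) n []).reverse) 0 : Nat) : Int)
               ((PySem.List.count (aPadLoop 8 (aDigitsLoop (n.toNat + 1) n []).reverse) 2 : Nat) : Int) := by
  unfold classify_landform_from_bathymorphon pvLookA
  rw [if_neg (by omega)]

lemma B_char (n : Int) (c : String) (h0 : 0 ≤ n) :
    classify_landform_from_bathymorphon_alt n c =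
      pvLookB c (bCounts n 8).1 (bCounts n 8).2 := by
  unfold classify_landform_from_bathymorphon_alt pvLookB
  rw [if_neg (by omega)]

-- ===== VERDICT (by name: the statement is the Claim_ definition above) =====
theorem classify_landform_from_bathymorphon_spec : Claim_equal_classify_landform_from_bathymorphon := by
  intro number classes _ hpre
  obtain ⟨h0, h1, hc⟩ := hpre
  unfold Spec_classify_landform_from_bathymorphon
  rw [A_char number classes h0, B_char number classes h0,
      bCounts_eq 8 number h0 (by norm_num; omega) (number.toNat + 1) (by omega)]
  set digits := aDigitsLoop (number.toNat + 1) number [] with hd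
  have hlen : digits.length ≤ 8 := by
    rw [hd]; exact digits_len_le (number.toNat + 1) 8 number h0 (by norm_num; omega)
  have hpad : aPadLoop 8 digits.reverse = List.replicate (8 - digits.reverse.length) 0 ++ digits.reverse := by
    exact padLoop_eq 8 digits.reverse (by omega)
  have hc0 : digits.count 0 ≤ digits.length := List.count_le_length
  have hc2 : digits.count 2 ≤ digits.length := List.count_le_length
  have hc02 : digits.count 0 + digits.count 2 ≤ digits.length := count02_le digits
  rw [hpad]
  simp only [PySem.List.count_eq, List.count_append, List.count_replicate, List.count_reverse,
    List.length_reverse]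
  norm_num
  have hmeq : ((8 : Int) - (digits.length : Int) + (digits.count 0 : Int)) =
      (((8 - digits.length + digits.count 0 : Nat)) : Int) := by push_cast; omega
  rw [hmeq]
  have hm : (8 - digits.length + digits.count 0) ∈ List.range 9 := by
    rw [List.mem_range]; omega
  have hp : digits.count 2 ∈ List.range 9 := by rw [List.mem_range]; omega
  have hcm : classes ∈ (["10c", "6c", "5c", "4c"] : List String) := by
    rcases hc with h | h | h | h <;> simp [h]
  have := lookup_eq classes hcm _ hm _ hp
  exact this
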